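-- pv_equiv track=rewrite | github.com/Akgop/Problem-Solving | Mathmatical/baekjoon_1748_numbersconcat.py | solution
-- ===== SOURCE A (Python) =====
-- def solution(n):
--     n_str = list(str(n))
--     answer = 0
--     digit = '9'
--     for i in range(len(n_str)-1, 0, -1):
--         answer += (int(digit) * (len(n_str) - i))
--         digit += '0'
--     answer += (n - (10 ** (len(n_str) - 1) - 1)) * len(n_str)
--     return answer
-- ===== SOURCE B (Python) =====
-- def solution(n):
--     L = len(str(n))
--     return L * (n + 1) - (10 ** L - 1) // 9
-- ===== Notes on version B (the rewrite author's own statement) =====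
-- stated objective: simpler
-- what changed: Replaced A's loop (which builds growing digit strings '9','90','900', converts each back with int(), and adds a separate remainder term) by the loop-free closed form L*(n+1) - (10**L - 1)//9 with L = len(str(n)); no loop, no string building.
import Mathlib
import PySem

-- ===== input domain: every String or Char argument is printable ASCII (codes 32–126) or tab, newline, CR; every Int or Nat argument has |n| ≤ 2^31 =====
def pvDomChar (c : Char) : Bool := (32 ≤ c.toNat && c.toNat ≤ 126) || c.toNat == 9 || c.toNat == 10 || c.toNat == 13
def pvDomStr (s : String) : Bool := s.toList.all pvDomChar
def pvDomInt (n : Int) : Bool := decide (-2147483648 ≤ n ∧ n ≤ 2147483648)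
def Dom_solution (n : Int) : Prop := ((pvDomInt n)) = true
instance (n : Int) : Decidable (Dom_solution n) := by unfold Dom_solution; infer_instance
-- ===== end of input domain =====

-- B replaces A's loop over digit-length groups (with its growing '9','90','900' digit
-- strings and separate remainder term) by the loop-free closed form
-- L*(n+1) - (10**L - 1)//9 with L = len(str(n))  (objective: simpler).

-- ===== PORT A =====
def solution (n : Int) : Int :=
  let nStr : List Char := PySem.Int.toChars n
  let st := (PySem.List.pyRange ((nStr.length : Int) - 1) 0 (-1)).foldl
    (fun (st : Int × List Char) i =>
      (st.1 + ((PySem.Int.ofChars? st.2).getD 0) * ((nStr.length : Int) - i),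
       st.2 ++ ['0']))
    (0, ['9'])
  st.1 + (n - (10 ^ ((nStr.length : Int) - 1).toNat - 1)) * (nStr.length : Int)

-- ===== PORT B =====
def solution_alt (n : Int) : Int :=
  let L : Int := ((PySem.Int.toChars n).length : Int)
  L * (n + 1) - PySem.Int.floordiv (10 ^ L.toNat - 1) 9

-- ===== PRECONDITION & SPEC =====
def Spec_solution (n : Int) (out : Int) : Prop := out = solution_alt n
instance (n : Int) (out : Int) : Decidable (Spec_solution n out) := by unfold Spec_solution; infer_instance

-- ===== CLAIM (what is proved, stated in full; the proofs are below) =====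
def Claim_equal_solution : Prop := ∀ (n : Int), Dom_solution n → Spec_solution n (solution n)

-- ===== LEMMAS AND PROOFS =====

lemma tdc_len (f : Nat) : ∀ (n : Nat) (ds : List Char), n < f →
    (Nat.toDigitsCore 10 f n ds).length = Nat.log 10 n + 1 + ds.length := by
  induction f with
  | zero => intro n ds h; omega
  | succ f ih =>
    intro n ds h
    rw [Nat.toDigitsCore]
    by_cases h10 : n / 10 = 0
    · have hn10 : n < 10 := by omega
      simp [h10, Nat.log_eq_zero_iff.mpr (Or.inl hn10)]; omega
    · have hge : 10 ≤ n := by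
        by_contra hc; exact h10 (Nat.div_eq_of_lt (by omega))
      have hlt : n / 10 < f := by
        have := Nat.div_lt_self (by omega : 0 < n) (by norm_num : 1 < 10)
        omega
      simp only [h10, if_false]
      rw [ih (n / 10) _ hlt, Nat.log_of_one_lt_of_le (by norm_num) hge]
      simp; omega

lemma len_toChars (n : Int) (h : 0 ≤ n) :
    (PySem.Int.toChars n).length = Nat.log 10 n.toNat + 1 := by
  rw [PySem.Int.toChars, if_neg (by omega)]
  rw [Nat.toDigits, tdc_len (n.toNat + 1) n.toNat [] (by omega)]
  simp

lemma len_toChars_neg (n : Int) (h : n < 0) :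
    (PySem.Int.toChars n).length = Nat.log 10 n.natAbs + 2 := by
  rw [PySem.Int.toChars, if_pos h, List.length_cons]
  rw [Nat.toDigits, tdc_len (n.natAbs + 1) n.natAbs [] (by omega)]
  simp

lemma oc1 : (PySem.Int.ofChars? ['9']).getD 0 = 9 := by decide
lemma oc2 : (PySem.Int.ofChars? ['9','0']).getD 0 = 90 := by decide
lemma oc3 : (PySem.Int.ofChars? ['9','0','0']).getD 0 = 900 := by decide
lemma oc4 : (PySem.Int.ofChars? ['9','0','0','0']).getD 0 = 9000 := by decide
lemma oc5 : (PySem.Int.ofChars? ['9','0','0','0','0']).getD 0 = 90000 := by decide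
lemma oc6 : (PySem.Int.ofChars? ['9','0','0','0','0','0']).getD 0 = 900000 := by decide
lemma oc7 : (PySem.Int.ofChars? ['9','0','0','0','0','0','0']).getD 0 = 9000000 := by decide
lemma oc8 : (PySem.Int.ofChars? ['9','0','0','0','0','0','0','0']).getD 0 = 90000000 := by decide
lemma oc9 : (PySem.Int.ofChars? ['9','0','0','0','0','0','0','0','0']).getD 0 = 900000000 := by decide
lemma oc10 : (PySem.Int.ofChars? ['9','0','0','0','0','0','0','0','0','0']).getD 0 = 9000000000 := by decide

lemma fd (k : Nat) : PySem.Int.floordiv ((10:Int) ^ k - 1) 9 = ((10 ^ k - 1) / 9 : Nat) := by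
  rw [PySem.Int.floordiv]
  have h1 : ((10:Int) ^ k - 1) = ((10 ^ k - 1 : Nat) : Int) := by
    rw [Nat.cast_sub (Nat.one_le_pow _ _ (by norm_num))]
    push_cast; ring
  rw [h1, Int.fdiv_eq_ediv_of_nonneg _ (by norm_num : (0:Int) ≤ 9)]
  norm_cast

lemma tn0 : ((0 : Int)).toNat = 0 := rfl
lemma tn1 : ((1 : Int)).toNat = 1 := rfl
lemma tn2 : ((2 : Int)).toNat = 2 := rfl
lemma tn3 : ((3 : Int)).toNat = 3 := rfl
lemma tn4 : ((4 : Int)).toNat = 4 := rfl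
lemma tn5 : ((5 : Int)).toNat = 5 := rfl
lemma tn6 : ((6 : Int)).toNat = 6 := rfl
lemma tn7 : ((7 : Int)).toNat = 7 := rfl
lemma tn8 : ((8 : Int)).toNat = 8 := rfl
lemma tn9 : ((9 : Int)).toNat = 9 := rfl
lemma tn10 : ((10 : Int)).toNat = 10 := rfl
lemma tn11 : ((11 : Int)).toNat = 11 := rfl

-- ===== VERDICT (by name: the statement is the Claim_ definition above) =====
theorem solution_spec : Claim_equal_solution := by
  intro n hdom
  have hbd : -2147483648 ≤ n ∧ n ≤ 2147483648 := by
    unfold Dom_solution pvDomInt at hdom; simpa using hdom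
  show solution n = solution_alt n
  rcases lt_or_ge n 0 with hneg | hn
  · -- negative n: length = log10 |n| + 2 (the '-' sign)
    have hlen := len_toChars_neg n hneg
    have hmub : n.natAbs < 10 ^ 10 := by omega
    have hlog : Nat.log 10 n.natAbs ≤ 9 := by
      have := Nat.log_lt_of_lt_pow (by omega : n.natAbs ≠ 0) hmub
      omega
    have hup : n.natAbs < 10 ^ (Nat.log 10 n.natAbs + 1) :=
      Nat.lt_pow_succ_log_self (by norm_num) n.natAbs
    have hlow : 10 ^ (Nat.log 10 n.natAbs) ≤ n.natAbs :=
      Nat.pow_log_le_self 10 (by omega)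
    have hcases : Nat.log 10 n.natAbs = 0 ∨ Nat.log 10 n.natAbs = 1 ∨ Nat.log 10 n.natAbs = 2 ∨
        Nat.log 10 n.natAbs = 3 ∨ Nat.log 10 n.natAbs = 4 ∨ Nat.log 10 n.natAbs = 5 ∨
        Nat.log 10 n.natAbs = 6 ∨ Nat.log 10 n.natAbs = 7 ∨ Nat.log 10 n.natAbs = 8 ∨
        Nat.log 10 n.natAbs = 9 := by omega
    rcases hcases with hk | hk | hk | hk | hk | hk | hk | hk | hk | hk <;>
      rw [hk] at hlen hup hlow <;>
      simp only [solution, solution_alt, hlen, fd] <;>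
      norm_num [PySem.List.pyRange_one, PySem.List.pyRange_neg_one, List.range_succ,
        tn0, tn1, tn2, tn3, tn4, tn5, tn6, tn7, tn8, tn9, tn10, tn11,
        List.map_append, List.foldl_append, List.foldl,
        oc1, oc2, oc3, oc4, oc5, oc6, oc7, oc8, oc9, oc10] <;>
      omega
  · -- nonnegative n: length = log10 n + 1
    have hlen := len_toChars n hn
    have hmub : n.toNat < 10 ^ 10 := by omega
    have hlog : Nat.log 10 n.toNat ≤ 9 := by
      rcases Nat.eq_zero_or_pos n.toNat with h0 | hp
      · simp [h0]
      · have := Nat.log_lt_of_lt_pow (by omega : n.toNat ≠ 0) hmub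
        omega
    have hup : n.toNat < 10 ^ (Nat.log 10 n.toNat + 1) :=
      Nat.lt_pow_succ_log_self (by norm_num) n.toNat
    have hlow : 10 ^ (Nat.log 10 n.toNat) ≤ n.toNat ∨ (n.toNat = 0 ∧ Nat.log 10 n.toNat = 0) := by
      rcases Nat.eq_zero_or_pos n.toNat with h0 | hp
      · exact Or.inr ⟨h0, by simp [h0]⟩
      · exact Or.inl (Nat.pow_log_le_self 10 (by omega))
    have hcases : Nat.log 10 n.toNat = 0 ∨ Nat.log 10 n.toNat = 1 ∨ Nat.log 10 n.toNat = 2 ∨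
        Nat.log 10 n.toNat = 3 ∨ Nat.log 10 n.toNat = 4 ∨ Nat.log 10 n.toNat = 5 ∨
        Nat.log 10 n.toNat = 6 ∨ Nat.log 10 n.toNat = 7 ∨ Nat.log 10 n.toNat = 8 ∨
        Nat.log 10 n.toNat = 9 := by omega
    rcases hcases with hk | hk | hk | hk | hk | hk | hk | hk | hk | hk <;>
      rw [hk] at hlen hup hlow <;>
      simp only [solution, solution_alt, hlen, fd] <;>
      norm_num [PySem.List.pyRange_one, PySem.List.pyRange_neg_one, List.range_succ,
        tn0, tn1, tn2, tn3, tn4, tn5, tn6, tn7, tn8, tn9, tn10, tn11,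
        List.map_append, List.foldl_append, List.foldl,
        oc1, oc2, oc3, oc4, oc5, oc6, oc7, oc8, oc9, oc10] <;>
      rcases hlow with hlow | ⟨h0, h00⟩ <;> omega
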